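-- pv_equiv track=rewrite | github.com/Hima-Parami/ADHD_Handwriting_Backend | app/services/handwriting_service.py | _group_strokes
-- ===== SOURCE A (Python) =====
-- from typing import Any, Dict, List
--
-- def _group_strokes(strokes: List[Dict[str, Any]]) -> List[List[Dict[str, Any]]]:
--     """Split flat stroke-point list into individual stroke groups
--     (each starting with a 'start' point followed by 'move' points)."""
--     groups: List[List[Dict[str, Any]]] = []
--     current: List[Dict[str, Any]] | None = None
--
--     for pt in strokes:
--         if pt["type"] == "start":
--             if current and len(current) > 1:
--                 groups.append(current)
--             current = [pt]
--         elif pt["type"] == "move" and current is not None: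
--             current.append(pt)
--
--     if current and len(current) > 1:
--         groups.append(current)
--
--     return groups
-- ===== SOURCE B (Python) =====
-- from typing import Any, Dict, List
--
-- def _group_strokes(strokes: List[Dict[str, Any]]) -> List[List[Dict[str, Any]]]:
--     """Split flat stroke-point list into individual stroke groups.
--
--     Two passes: first cut raw segments at each 'start' point (points before
--     the first start are discarded), then clean each segment to its start
--     point plus 'move' points and keep only groups longer than 1."""
--     # pass 1: raw segments, cut at every 'start'
--     segments: List[List[Dict[str, Any]]] = []
--     for pt in strokes:
--         if pt["type"] == "start":
--             segments.append([pt])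
--         elif segments:
--             segments[-1].append(pt)
--     # pass 2: clean each segment and keep the real groups
--     cleaned = [[seg[0]] + [p for p in seg[1:] if p["type"] == "move"]
--                for seg in segments]
--     return [c for c in cleaned if len(c) > 1]
-- ===== Notes on version B (the rewrite author's own statement) =====
-- stated objective: alternative
-- what changed: A's single fused loop carrying a (groups, current) accumulator is replaced by two distinct passes: pass 1 cuts the flat list into raw segments at every 'start' point (dropping points before the first start), pass 2 cleans each segment to its start point plus 'move' points and keeps only groups longer than 1.
import Mathlib
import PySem

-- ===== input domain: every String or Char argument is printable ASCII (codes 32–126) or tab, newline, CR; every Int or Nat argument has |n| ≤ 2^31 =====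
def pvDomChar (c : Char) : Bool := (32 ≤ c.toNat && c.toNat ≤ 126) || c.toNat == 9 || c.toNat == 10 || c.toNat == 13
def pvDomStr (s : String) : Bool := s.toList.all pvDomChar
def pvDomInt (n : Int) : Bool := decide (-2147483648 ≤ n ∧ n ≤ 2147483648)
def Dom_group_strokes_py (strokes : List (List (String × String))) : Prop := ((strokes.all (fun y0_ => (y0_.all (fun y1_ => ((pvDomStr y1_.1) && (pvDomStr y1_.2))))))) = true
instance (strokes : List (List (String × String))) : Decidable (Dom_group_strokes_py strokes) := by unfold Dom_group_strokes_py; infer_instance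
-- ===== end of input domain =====

-- B replaces A's single fused accumulator loop by two distinct passes (cut raw
-- segments at each 'start', then clean/filter each segment); objective: alternative
-- decomposition, same cost.

-- pt["type"] : first-match lookup in the association list (KeyError excluded by Pre_)
def ptype (pt : List (String × String)) : String := (List.lookup "type" pt).getD ""

-- ===== PORT A =====
-- 'if current and len(current) > 1: groups.append(current)' (appears twice in A)
def gsFlush (groups : List (List (List (String × String)))) (current : Option (List (List (String × String)))) :
    List (List (List (String × String))) :=
  match current with
  | some c => if 1 < c.length then groups ++ [c] else groups
  | none => groups

-- one iteration of A's for-loop over (groups, current)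
def gsStep (st : List (List (List (String × String))) × Option (List (List (String × String))))
    (pt : List (String × String)) :
    List (List (List (String × String))) × Option (List (List (String × String))) :=
  if ptype pt == "start" then (gsFlush st.1 st.2, some [pt])
  else if ptype pt == "move" then (st.1, st.2.map (fun c => c ++ [pt]))
  else st

def group_strokes_py (strokes : List (List (String × String))) : List (List (List (String × String))) :=
  let st := strokes.foldl gsStep ([], none)
  gsFlush st.1 st.2

-- ===== PORT B =====
-- segments[-1].append(pt)
def appendLast : List (List (List (String × String))) → List (String × String) → List (List (List (String × String)))
  | [], _ => []
  | [s], pt => [s ++ [pt]]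
  | s :: rest, pt => s :: appendLast rest pt

-- pass 1 body: cut a new raw segment at each 'start'
def segStep (segs : List (List (List (String × String)))) (pt : List (String × String)) :
    List (List (List (String × String))) :=
  if ptype pt == "start" then segs ++ [[pt]]
  else if segs.isEmpty then segs
  else appendLast segs pt

-- pass 2: [seg[0]] + [p for p in seg[1:] if p["type"] == "move"]
def gsClean : List (List (String × String)) → List (List (String × String))
  | [] => []
  | h :: t => h :: t.filter (fun p => ptype p == "move")

def group_strokes_py_alt (strokes : List (List (String × String))) : List (List (List (String × String))) :=
  let segments := strokes.foldl segStep []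
  let cleaned := segments.map gsClean
  cleaned.filter (fun c => decide (1 < c.length))

-- ===== PRECONDITION & SPEC =====
-- Pre_ excludes inputs where some point lacks the key "type": there Python A raises KeyError.
def Pre_group_strokes_py (strokes : List (List (String × String))) : Prop :=
  ∀ pt ∈ strokes, (List.lookup "type" pt).isSome = true
instance (strokes : List (List (String × String))) : Decidable (Pre_group_strokes_py strokes) := by
  unfold Pre_group_strokes_py; infer_instance
def pvWitness_group_strokes_py : (List (List (String × String))) :=
  [[("type", "start")], [("type", "move")]]

def Spec_group_strokes_py (strokes : List (List (String × String))) (out : List (List (List (String × String)))) : Prop := out = group_strokes_py_alt strokes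
instance (strokes : List (List (String × String))) (out : List (List (List (String × String)))) : Decidable (Spec_group_strokes_py strokes out) := by unfold Spec_group_strokes_py; infer_instance

-- ===== CLAIM (what is proved, stated in full; the proofs are below) =====
def Claim_equal_group_strokes_py : Prop := ∀ (strokes : List (List (String × String))), Dom_group_strokes_py strokes → Pre_group_strokes_py strokes → Spec_group_strokes_py strokes (group_strokes_py strokes)

-- ===== LEMMAS AND PROOFS =====

-- B's second pass as a function of the segment list
def pass2 (segs : List (List (List (String × String)))) : List (List (List (String × String))) :=
  (segs.map gsClean).filter (fun c => decide (1 < c.length))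

theorem appendLast_snoc (init : List (List (List (String × String)))) (s : List (List (String × String)))
    (pt : List (String × String)) : appendLast (init ++ [s]) pt = init ++ [s ++ [pt]] := by
  induction init with
  | nil => simp [appendLast]
  | cons a init ih =>
    rcases e : init ++ [s] with _ | ⟨b, l⟩
    · simp at e
    · simp only [List.cons_append, e, appendLast]
      rw [← e, ih]

theorem pass2_snoc (segs : List (List (List (String × String)))) (s : List (List (String × String))) :
    pass2 (segs ++ [s]) = pass2 segs ++ (if 1 < (gsClean s).length then [gsClean s] else []) := by
  simp only [pass2, List.map_append, List.filter_append, List.map_cons, List.map_nil,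
    List.filter]
  split <;> simp_all

theorem clean_snoc (s : List (List (String × String))) (hs : s ≠ []) (pt : List (String × String)) :
    gsClean (s ++ [pt]) = if ptype pt == "move" then gsClean s ++ [pt] else gsClean s := by
  cases s with
  | nil => exact absurd rfl hs
  | cons h t =>
    simp only [List.cons_append, gsClean, List.filter_append, List.filter]
    split <;> simp_all

theorem loop_inv (pts : List (List (String × String))) :
    ∀ (init : List (List (List (String × String)))) (s : List (List (String × String))), s ≠ [] →
      (let st := pts.foldl gsStep (pass2 init, some (gsClean s)); gsFlush st.1 st.2)
        = pass2 (pts.foldl segStep (init ++ [s])) := by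
  induction pts with
  | nil =>
    intro init s _
    simp only [List.foldl_nil, gsFlush, pass2_snoc]
    split <;> simp_all
  | cons pt pts ih =>
    intro init s hs
    simp only [List.foldl_cons]
    by_cases hstart : (ptype pt == "start") = true
    · have h1 : gsStep (pass2 init, some (gsClean s)) pt
          = (pass2 (init ++ [s]), some (gsClean [pt])) := by
        simp only [gsStep, hstart, if_true]
        refine Prod.ext ?_ rfl
        show gsFlush (pass2 init) (some (gsClean s)) = pass2 (init ++ [s])
        rw [pass2_snoc]
        unfold gsFlush
        split <;> (try split) <;> simp_all
      have h2 : segStep (init ++ [s]) pt = (init ++ [s]) ++ [[pt]] := by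
        simp [segStep, hstart]
      rw [h1, h2, ih (init ++ [s]) [pt] (by simp)]
    · by_cases hmove : (ptype pt == "move") = true
      · have h1 : gsStep (pass2 init, some (gsClean s)) pt
            = (pass2 init, some (gsClean (s ++ [pt]))) := by
          simp [gsStep, hstart, hmove, clean_snoc s hs pt]
        have h2 : segStep (init ++ [s]) pt = init ++ [s ++ [pt]] := by
          have : ((init ++ [s]).isEmpty) = false := by simp
          simp [segStep, hstart, this, appendLast_snoc]
        rw [h1, h2, ih init (s ++ [pt]) (by simp)]
      · have h1 : gsStep (pass2 init, some (gsClean s)) pt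
            = (pass2 init, some (gsClean (s ++ [pt]))) := by
          simp [gsStep, hstart, hmove, clean_snoc s hs pt]
        have h2 : segStep (init ++ [s]) pt = init ++ [s ++ [pt]] := by
          have : ((init ++ [s]).isEmpty) = false := by simp
          simp [segStep, hstart, this, appendLast_snoc]
        rw [h1, h2, ih init (s ++ [pt]) (by simp)]

theorem loop_start (pts : List (List (String × String))) :
    (let st := pts.foldl gsStep ([], none); gsFlush st.1 st.2)
      = pass2 (pts.foldl segStep []) := by
  induction pts with
  | nil => simp [gsFlush, pass2]
  | cons pt pts ih =>
    simp only [List.foldl_cons]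
    by_cases hstart : (ptype pt == "start") = true
    · have h1 : gsStep ([], none) pt = (pass2 [], some (gsClean [pt])) := by
        simp [gsStep, hstart, gsFlush, gsClean, pass2]
      have h2 : segStep [] pt = [] ++ [[pt]] := by simp [segStep, hstart]
      rw [h1, h2, loop_inv pts [] [pt] (by simp)]
    · have h1 : gsStep ([], none) pt = ([], none) := by
        simp only [gsStep]
        rw [if_neg hstart]
        split <;> rfl
      have h2 : segStep [] pt = [] := by simp [segStep, hstart]
      rw [h1, h2, ih]

-- ===== VERDICT (by name: the statement is the Claim_ definition above) =====
theorem group_strokes_py_spec : Claim_equal_group_strokes_py := by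
  intro strokes _ _
  show group_strokes_py strokes = group_strokes_py_alt strokes
  have := loop_start strokes
  simpa [group_strokes_py, group_strokes_py_alt, pass2] using this
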